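-- pv_equiv track=rewrite | github.com/songblaq/testforge | src/testforge/analysis/analyzer.py | _summarize_heading_context
-- ===== SOURCE A (Python) =====
-- def _summarize_heading_context(text: str, heading: str) -> str:
--     """Return a short description for an offline-derived feature."""
--     lines = [line.strip() for line in text.splitlines() if line.strip()]
--     for idx, line in enumerate(lines):
--         if heading.lower() in line.lower():
--             for follow in lines[idx + 1:]:
--                 if follow and not follow.startswith("#"):
--                     return follow[:200]
--     return f"Offline-derived feature for {heading}"
-- ===== SOURCE B (Python) =====
-- def _summarize_heading_context(text: str, heading: str) -> str:
--     """Single flat pass with a found-flag state machine (no nested loops)."""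
--     needle = heading.lower()
--     found = False
--     for raw in text.splitlines():
--         line = raw.strip()
--         if not line:
--             continue
--         if found:
--             if not line.startswith("#"):
--                 return line[:200]
--         elif needle in line.lower():
--             found = True
--     return f"Offline-derived feature for {heading}"
-- ===== Notes on version B (the rewrite author's own statement) =====
-- stated objective: simpler
-- what changed: Replaces A's nested loops (enumerate plus an inner rescan of lines[idx+1:] for every heading match) and the up-front list comprehension with one flat streaming pass over splitlines() maintaining a boolean found flag.
import Mathlib
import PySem

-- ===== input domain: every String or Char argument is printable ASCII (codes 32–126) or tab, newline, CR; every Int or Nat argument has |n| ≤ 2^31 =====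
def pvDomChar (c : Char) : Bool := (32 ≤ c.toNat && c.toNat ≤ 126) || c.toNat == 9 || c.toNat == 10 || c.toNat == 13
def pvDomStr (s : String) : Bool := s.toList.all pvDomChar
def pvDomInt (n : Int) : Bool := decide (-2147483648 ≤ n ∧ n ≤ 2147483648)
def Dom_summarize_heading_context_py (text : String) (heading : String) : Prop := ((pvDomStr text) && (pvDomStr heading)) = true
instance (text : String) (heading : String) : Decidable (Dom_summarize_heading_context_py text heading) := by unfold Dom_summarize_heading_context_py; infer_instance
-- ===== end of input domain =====

-- B replaces A's nested loops (enumerate + inner rescan of lines[idx+1:]) with one flat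
-- streaming pass over splitlines() carrying a boolean `found` flag (objective: simpler).

-- ===== PORT A =====
-- inner loop: `for follow in lines[idx + 1:]: if follow and not follow.startswith("#"): return follow[:200]`
def pvAInner : List String → Option String
  | [] => none
  | f :: rest =>
    if f ≠ "" ∧ PySem.Str.startswith f "#" = false then
      some (PySem.Str.slice f none (some 200))
    else pvAInner rest

-- outer loop: `for idx, line in enumerate(lines): if heading.lower() in line.lower(): …`
-- (the suffix carried by the recursion is exactly lines[idx + 1:])
def pvAOuter (h : String) : List String → Option String
  | [] => none
  | l :: rest =>
    if PySem.Str.isIn h (PySem.Str.lower l) then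
      match pvAInner rest with
      | some r => some r
      | none => pvAOuter h rest
    else pvAOuter h rest

def summarize_heading_context_py (text : String) (heading : String) : String :=
  match pvAOuter (PySem.Str.lower heading)
      (((PySem.Str.splitlines text).map PySem.Str.strip).filter (fun l => l ≠ "")) with
  | some r => r
  | none => "Offline-derived feature for " ++ heading

-- ===== PORT B =====
-- single pass over raw splitlines with a `found` flag (Source B's loop, step for step)
def pvBGo (needle : String) (heading : String) : List String → Bool → String
  | [], _ => "Offline-derived feature for " ++ heading
  | raw :: rest, found =>
    let line := PySem.Str.strip raw
    if line = "" then pvBGo needle heading rest found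
    else if found then
      (if PySem.Str.startswith line "#" = false then PySem.Str.slice line none (some 200)
       else pvBGo needle heading rest found)
    else if PySem.Str.isIn needle (PySem.Str.lower line) then pvBGo needle heading rest true
    else pvBGo needle heading rest false

def summarize_heading_context_py_alt (text : String) (heading : String) : String :=
  pvBGo (PySem.Str.lower heading) heading (PySem.Str.splitlines text) false

-- ===== PRECONDITION & SPEC =====
def Spec_summarize_heading_context_py (text : String) (heading : String) (out : String) : Prop := out = summarize_heading_context_py_alt text heading
instance (text : String) (heading : String) (out : String) : Decidable (Spec_summarize_heading_context_py text heading out) := by unfold Spec_summarize_heading_context_py; infer_instance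

-- ===== CLAIM (what is proved, stated in full; the proofs are below) =====
def Claim_equal_summarize_heading_context_py : Prop := ∀ (text : String) (heading : String), Dom_summarize_heading_context_py text heading → Spec_summarize_heading_context_py text heading (summarize_heading_context_py text heading)

-- ===== LEMMAS AND PROOFS =====

-- B's pass, restricted to an already-stripped, nonempty-filtered list (proof helper)
def pvBGoClean (needle : String) (heading : String) : List String → Bool → String
  | [], _ => "Offline-derived feature for " ++ heading
  | line :: rest, true =>
    if PySem.Str.startswith line "#" = false then PySem.Str.slice line none (some 200)
    else pvBGoClean needle heading rest true
  | line :: rest, false =>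
    if PySem.Str.isIn needle (PySem.Str.lower line) then pvBGoClean needle heading rest true
    else pvBGoClean needle heading rest false

theorem pvBGo_eq_clean (n hd : String) (ls : List String) (found : Bool) :
    pvBGo n hd ls found
      = pvBGoClean n hd ((ls.map PySem.Str.strip).filter (fun l => l ≠ "")) found := by
  induction ls generalizing found with
  | nil => cases found <;> rfl
  | cons raw rest ih =>
    by_cases h : PySem.Str.strip raw = ""
    · have hcl : (((raw :: rest).map PySem.Str.strip).filter (fun l => l ≠ ""))
          = ((rest.map PySem.Str.strip).filter (fun l => l ≠ "")) := by
        simp [h]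
      rw [hcl, ← ih found]
      simp only [pvBGo]
      rw [if_pos h]
    · have hcl : (((raw :: rest).map PySem.Str.strip).filter (fun l => l ≠ ""))
          = PySem.Str.strip raw :: ((rest.map PySem.Str.strip).filter (fun l => l ≠ "")) := by
        simp [h]
      rw [hcl]
      cases found with
      | false =>
        simp only [pvBGo, pvBGoClean]
        rw [if_neg h, if_neg Bool.false_ne_true]
        by_cases hc : PySem.Str.isIn n (PySem.Str.lower (PySem.Str.strip raw)) = true
        · rw [if_pos hc, if_pos hc]; exact ih true
        · rw [if_neg hc, if_neg hc]; exact ih false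
      | true =>
        simp only [pvBGo, pvBGoClean]
        rw [if_neg h, if_pos trivial]
        by_cases hs : PySem.Str.startswith (PySem.Str.strip raw) "#" = false
        · rw [if_pos hs, if_pos hs]
        · rw [if_neg hs, if_neg hs]; exact ih true

theorem pvAInner_eq_none (L : List String)
    (h : ∀ f ∈ L, ¬ (f ≠ "" ∧ PySem.Str.startswith f "#" = false)) : pvAInner L = none := by
  induction L with
  | nil => rfl
  | cons f rest ih =>
    have hf := h f (List.mem_cons_self ..)
    simp only [pvAInner]
    rw [if_neg hf]
    exact ih (fun g hg => h g (List.mem_cons_of_mem f hg))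

theorem pvAInner_none_forall (L : List String) (h : pvAInner L = none) :
    ∀ f ∈ L, ¬ (f ≠ "" ∧ PySem.Str.startswith f "#" = false) := by
  induction L with
  | nil => simp
  | cons f rest ih =>
    simp only [pvAInner] at h
    by_cases hf : f ≠ "" ∧ PySem.Str.startswith f "#" = false
    · rw [if_pos hf] at h; exact absurd h (by simp)
    · rw [if_neg hf] at h
      intro g hg
      rcases List.mem_cons.mp hg with rfl | hg'
      · exact hf
      · exact ih h g hg'

theorem pvAOuter_eq_none (h : String) (L : List String)
    (hall : ∀ f ∈ L, ¬ (f ≠ "" ∧ PySem.Str.startswith f "#" = false)) :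
    pvAOuter h L = none := by
  induction L with
  | nil => rfl
  | cons l rest ih =>
    have hrest : ∀ f ∈ rest, ¬ (f ≠ "" ∧ PySem.Str.startswith f "#" = false) :=
      fun g hg => hall g (List.mem_cons_of_mem l hg)
    have hinner := pvAInner_eq_none rest hrest
    simp only [pvAOuter]
    by_cases hc : PySem.Str.isIn h (PySem.Str.lower l) = true
    · rw [if_pos hc, hinner]; exact ih hrest
    · rw [if_neg hc]; exact ih hrest

theorem pvBGoClean_true (n hd : String) (L : List String) (hne : ∀ l ∈ L, l ≠ "") :
    pvBGoClean n hd L true = (pvAInner L).getD ("Offline-derived feature for " ++ hd) := by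
  induction L with
  | nil => rfl
  | cons f rest ih =>
    have hf : f ≠ "" := hne f (List.mem_cons_self ..)
    have hrest : ∀ l ∈ rest, l ≠ "" := fun g hg => hne g (List.mem_cons_of_mem f hg)
    simp only [pvBGoClean, pvAInner]
    by_cases hs : PySem.Str.startswith f "#" = false
    · rw [if_pos hs, if_pos ⟨hf, hs⟩]; rfl
    · rw [if_neg hs, if_neg (fun hcontra => hs hcontra.2)]
      exact ih hrest

theorem pvBGoClean_false (n hd : String) (L : List String) (hne : ∀ l ∈ L, l ≠ "") :
    pvBGoClean n hd L false = (pvAOuter n L).getD ("Offline-derived feature for " ++ hd) := by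
  induction L with
  | nil => rfl
  | cons l rest ih =>
    have hrest : ∀ g ∈ rest, g ≠ "" := fun g hg => hne g (List.mem_cons_of_mem l hg)
    simp only [pvBGoClean, pvAOuter]
    by_cases hc : PySem.Str.isIn n (PySem.Str.lower l) = true
    · rw [if_pos hc, if_pos hc, pvBGoClean_true n hd rest hrest]
      cases hinner : pvAInner rest with
      | some r => rfl
      | none =>
        have houter := pvAOuter_eq_none n rest (pvAInner_none_forall rest hinner)
        simp [houter]
    · rw [if_neg hc, if_neg hc]
      exact ih hrest

-- ===== VERDICT (by name: the statement is the Claim_ definition above) =====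
theorem summarize_heading_context_py_spec : Claim_equal_summarize_heading_context_py := by
  intro text heading _
  unfold Spec_summarize_heading_context_py summarize_heading_context_py summarize_heading_context_py_alt
  have hne : ∀ l ∈ ((PySem.Str.splitlines text).map PySem.Str.strip).filter (fun l => l ≠ ""),
      l ≠ "" := by
    intro l hl
    exact of_decide_eq_true (List.mem_filter.mp hl).2
  rw [pvBGo_eq_clean, pvBGoClean_false _ _ _ hne]
  cases h : pvAOuter (PySem.Str.lower heading)
      (((PySem.Str.splitlines text).map PySem.Str.strip).filter (fun l => l ≠ "")) <;> rfl
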